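-- pv_equiv track=rewrite | github.com/antoinehorr/projet-de-tomographie-discrete | algo.py | T0
-- ===== SOURCE A (Python) =====
-- def T0(j, l, s):
--     if (l == 0) :
--         return True
--     if (l >= 1) :
--         if j < s[l-1] - 1 :
--             return False
--         if j == s[l-1] - 1 :
--             return l <= 1
--         else :
--             return T0(j - 1, l, s) or T0(j - s[l-1] - 1, l - 1, s)
-- ===== SOURCE B (Python) =====
-- def T0(j, l, s):
--     if l == 0:
--         return True
--     m = s[0] - 1
--     for i in range(1, l):
--         m = max(m + s[i] + 1, s[i])
--     return j >= m
-- ===== Notes on version B (the rewrite author's own statement) =====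
-- stated objective: alternative
-- what changed: Replaces A's branching recursion T0(j-1,l)||T0(j-s[l-1]-1,l-1) by a single left-to-right loop that computes the minimal feasible j (a running threshold m with m = max(m+s[i]+1, s[i])) and then compares j against it once.
-- outside the precondition, e.g. on T0(0, -1, [1]): A returns None, B returns True
import Mathlib
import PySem

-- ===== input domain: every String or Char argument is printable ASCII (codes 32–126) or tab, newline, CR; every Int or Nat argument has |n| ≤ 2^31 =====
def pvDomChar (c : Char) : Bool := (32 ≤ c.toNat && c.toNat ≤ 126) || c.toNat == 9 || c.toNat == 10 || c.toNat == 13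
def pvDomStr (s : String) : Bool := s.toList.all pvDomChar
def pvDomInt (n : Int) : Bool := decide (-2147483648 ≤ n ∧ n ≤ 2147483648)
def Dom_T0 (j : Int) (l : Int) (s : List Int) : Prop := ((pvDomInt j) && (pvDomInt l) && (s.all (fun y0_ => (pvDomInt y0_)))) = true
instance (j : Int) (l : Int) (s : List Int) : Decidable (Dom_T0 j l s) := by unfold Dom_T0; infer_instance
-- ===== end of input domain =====

-- B replaces A's branching recursion by a single left-to-right pass that computes the
-- feasibility threshold and compares j against it once; equivalence is proved on Pre_T0 (0 ≤ l ≤ len s).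

-- ===== PORT A =====
def T0 (j : Int) (l : Int) (s : List Int) : Bool :=
  if l = 0 then true
  else if _hl : 1 ≤ l then
    match hg : PySem.List.pyGet? s (l - 1) with
    | none => false  -- IndexError (l > len s): excluded by Pre_T0
    | some v =>
      if j < v - 1 then false
      else if j = v - 1 then decide (l ≤ 1)
      else T0 (j - 1) l s || T0 (j - v - 1) (l - 1) s
  else false  -- Python returns None here (l < 0): excluded by Pre_T0
termination_by (l.toNat, (j + 1 - PySem.List.pyGetD s (l - 1) 0).toNat)
decreasing_by
  · apply Prod.Lex.right
    simp [PySem.List.pyGetD, hg]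
    omega
  · apply Prod.Lex.left
    omega

-- ===== PORT B =====
def T0_alt (j : Int) (l : Int) (s : List Int) : Bool :=
  if l = 0 then true
  else
    let m0 := PySem.List.pyGetD s 0 0 - 1           -- s[0] (valid under Pre_T0)
    let m := (PySem.List.pyRange 1 l 1).foldl
      (fun m i => max (m + PySem.List.pyGetD s i 0 + 1) (PySem.List.pyGetD s i 0)) m0
    decide (m ≤ j)

-- ===== PRECONDITION & SPEC =====
-- Pre_T0 excludes l < 0 (A falls off the end and returns None, not a bool) and
-- l > len(s) (A raises IndexError on s[l-1]).
def Pre_T0 (j : Int) (l : Int) (s : List Int) : Prop := 0 ≤ l ∧ l ≤ s.length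
instance (j : Int) (l : Int) (s : List Int) : Decidable (Pre_T0 j l s) := by unfold Pre_T0; infer_instance
def pvWitness_T0 : Int × Int × List Int := (3, 2, [2, 1])

def Spec_T0 (j : Int) (l : Int) (s : List Int) (out : Bool) : Prop := out = T0_alt j l s
instance (j : Int) (l : Int) (s : List Int) (out : Bool) : Decidable (Spec_T0 j l s out) := by unfold Spec_T0; infer_instance

-- ===== CLAIM (what is proved, stated in full; the proofs are below) =====
def Claim_equal_T0 : Prop := ∀ (j : Int) (l : Int) (s : List Int), Dom_T0 j l s → Pre_T0 j l s → Spec_T0 j l s (T0 j l s)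

-- ===== LEMMAS AND PROOFS =====

-- the feasibility threshold both programs compute: T0 j n s = (thr n s ≤ j) for 1 ≤ n ≤ len s
def thr : Nat → List Int → Int
  | 0, _ => 0
  | 1, s => s.getD 0 0 - 1
  | (n+2), s => max (thr (n+1) s + s.getD (n+1) 0 + 1) (s.getD (n+1) 0)

theorem foldB (s : List Int) : ∀ (n : Nat), 1 ≤ n →
    (PySem.List.pyRange 1 (n : Int) 1).foldl
      (fun m i => max (m + PySem.List.pyGetD s i 0 + 1) (PySem.List.pyGetD s i 0))
      (PySem.List.pyGetD s 0 0 - 1) = thr n s := by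
  intro n
  induction n with
  | zero => omega
  | succ m ih =>
    intro _
    match m with
    | 0 =>
      rw [PySem.List.pyRange_one_eq_nil (by norm_num)]
      simp [thr, PySem.List.pyGetD_zero]
    | k + 1 =>
      have hsplit : PySem.List.pyRange 1 ((k + 2 : Nat) : Int) 1
          = PySem.List.pyRange 1 ((k + 1 : Nat) : Int) 1 ++ [((k + 1 : Nat) : Int)] := by
        have := PySem.List.pyRange_one_succ_right (a := 1) (b := ((k + 1 : Nat) : Int)) (by omega)
        push_cast at this ⊢
        convert this using 2
      rw [hsplit, List.foldl_append, ih (by omega)]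
      simp only [List.foldl_cons, List.foldl_nil]
      rw [PySem.List.pyGetD_natCast]
      simp [thr]

theorem lemB (s : List Int) (n : Nat) (h1 : 1 ≤ n) (_h2 : n ≤ s.length) (j : Int) :
    T0_alt j (n : Int) s = decide (thr n s ≤ j) := by
  have hne : ((n : Int)) ≠ 0 := by omega
  simp only [T0_alt, if_neg hne]
  rw [foldB s n h1]

-- one unfolding step of A's port when s[l-1] is in range
theorem T0_unfold (j l : Int) (s : List Int) (v : Int) (hne : l ≠ 0) (hge : 1 ≤ l)
    (hget : PySem.List.pyGet? s (l - 1) = some v) :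
    T0 j l s = if j < v - 1 then false else if j = v - 1 then decide (l ≤ 1)
      else T0 (j - 1) l s || T0 (j - v - 1) (l - 1) s := by
  rw [T0.eq_def, if_neg hne, dif_pos hge]
  split
  · next heq => rw [hget] at heq; cases heq
  · next v1 heq =>
    obtain rfl : v = v1 := by rw [hget] at heq; exact Option.some.inj heq
    rfl

theorem lemA (s : List Int) : ∀ (n : Nat), 1 ≤ n → n ≤ s.length →
    ∀ j : Int, T0 j (n : Int) s = decide (thr n s ≤ j) := by
  intro n
  induction n with
  | zero => omega
  | succ m ih =>
    intro _ hlen j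
    set v : Int := s.getD m 0 with hv
    have hget : PySem.List.pyGet? s (((m + 1 : Nat) : Int) - 1) = some v := by
      have h1 : (((m + 1 : Nat) : Int) - 1) = ((m : Nat) : Int) := by push_cast; ring
      rw [h1, PySem.List.pyGet?_natCast]
      simp [List.getElem?_eq_getElem (by omega : m < s.length), hv, List.getD]
    have hne : (((m + 1 : Nat) : Int)) ≠ 0 := by omega
    have hge : (1 : Int) ≤ ((m + 1 : Nat) : Int) := by omega
    match m, hv, hget, hlen, ih with
    | 0, hv, hget, hlen, ih =>
      -- l = 1 : threshold is v - 1
      rw [T0_unfold j _ s v hne hge hget]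
      have hthr : thr 1 s = v - 1 := by simp [thr, hv]
      split_ifs with hlt heq
      · symm; simp [hthr]; omega
      · simp [hthr, heq]
      · -- j > v - 1 : second disjunct T0 _ 0 s = true
        have h0 : (((1 : Nat) : Int) - 1) = (0 : Int) := by norm_num
        have htrue : T0 (j - v - 1) (((1 : Nat) : Int) - 1) s = true := by
          rw [h0, T0.eq_def]; simp
        rw [htrue, Bool.or_true]
        symm; simp [hthr]; omega
    | k + 1, hv, hget, hlen, ih =>
      -- l = k + 2 ≥ 2 : threshold is max (thr (k+1) s + v + 1) v
      have hthr : thr (k + 2) s = max (thr (k + 1) s + v + 1) v := by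
        simp [thr, hv]
      have hsub : (((k + 2 : Nat) : Int) - 1) = ((k + 1 : Nat) : Int) := by push_cast; ring
      have inner : ∀ (t : Nat) (j : Int), j ≤ (v - 1) + t →
          T0 j ((k + 2 : Nat) : Int) s = decide (thr (k + 2) s ≤ j) := by
        intro t
        induction t with
        | zero =>
          intro j hj
          rw [T0_unfold j _ s v hne hge hget]
          have hTv : v ≤ thr (k + 2) s := by rw [hthr]; exact le_max_right _ _
          split_ifs with hlt heq
          · symm; simp; omega
          · simp; omega
          · omega
        | succ t iht =>
          intro j hj
          by_cases hcase : j ≤ (v - 1) + t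
          · exact iht j hcase
          · have hjv : v - 1 < j := by omega
            rw [T0_unfold j _ s v hne hge hget]
            rw [if_neg (by omega), if_neg (by omega)]
            rw [iht (j - 1) (by push_cast at hj ⊢; omega)]
            rw [hsub, ih (by omega) (by omega) (j - v - 1)]
            rw [← Bool.decide_or]
            have h3 := max_choice (thr (k + 1) s + v + 1) v
            have h4 := le_max_left (thr (k + 1) s + v + 1) v
            have h5 := le_max_right (thr (k + 1) s + v + 1) v
            rw [hthr]
            rcases h3 with h3 | h3 <;> rw [h3] <;> rw [h3] at h4 h5 <;>
              simp only [decide_eq_decide] <;> omega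
      exact inner (j - (v - 1)).toNat j (by omega)

-- ===== VERDICT (by name: the statement is the Claim_ definition above) =====
theorem T0_spec : Claim_equal_T0 := by
  intro j l s _ hpre
  obtain ⟨h0, hlen⟩ := hpre
  unfold Spec_T0
  rcases eq_or_lt_of_le h0 with h | h
  · simp [T0, T0_alt, ← h]
  · have hn : l = ((l.toNat : Nat) : Int) := by omega
    rw [hn, lemA s l.toNat (by omega) (by omega), lemB s l.toNat (by omega) (by omega)]
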